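-- pv_equiv track=rewrite | github.com/drewbrew/advent-of-code-2018 | day7.py | sort_steps
-- ===== SOURCE A (Python) =====
-- def sort_steps(steps):
--     """Sort the steps into a form
--     {'A': ['B', 'D', 'F']}
--     where B, D, and F are the steps A needs to be complete before it can start
--     """
--     step_dict = {}
--     for dependency, step in steps:
--         try:
--             step_dict[step].append(dependency)
--         except KeyError:
--             step_dict[step] = [dependency]
--         if dependency not in step_dict:
--             step_dict[dependency] = []
--     return step_dict
-- ===== SOURCE B (Python) =====
-- def sort_steps(steps):
--     """Sort the steps into a form
--     {'A': ['B', 'D', 'F']}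
--     where B, D, and F are the steps A needs to be complete before it can start
--     """
--     edges = list(steps)
--     order = dict.fromkeys(n for dependency, step in edges for n in (step, dependency))
--     # for each node, gather its predecessors by scanning the edge list
--     return {node: [d for d, s in edges if s == node] for node in order}
-- ===== Notes on version B (the rewrite author's own statement) =====
-- stated objective: alternative
-- what changed: Instead of A's single mutating pass (try/except append into a dict plus membership guard), B computes the key order once and then builds each value independently by filtering the edge list per key (a per-key scan, no dict mutation), trading O(n) for O(n*k).
import Mathlib
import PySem

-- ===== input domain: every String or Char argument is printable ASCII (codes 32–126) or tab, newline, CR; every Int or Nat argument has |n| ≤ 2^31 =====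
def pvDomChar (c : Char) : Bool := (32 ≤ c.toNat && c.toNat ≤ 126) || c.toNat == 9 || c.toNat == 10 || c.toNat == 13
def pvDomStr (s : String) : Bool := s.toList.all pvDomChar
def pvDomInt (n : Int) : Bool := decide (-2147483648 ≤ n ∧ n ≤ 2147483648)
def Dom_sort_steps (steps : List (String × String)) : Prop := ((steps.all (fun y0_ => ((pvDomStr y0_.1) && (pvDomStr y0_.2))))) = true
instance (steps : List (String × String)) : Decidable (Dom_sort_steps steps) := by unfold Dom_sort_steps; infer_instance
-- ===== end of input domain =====

-- B replaces A's single mutating pass by computing the key order once and filtering the edge list per key; same results, different structure (per-key scans, no dict mutation).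


-- ===== PORT A =====
-- one iteration of A's loop body: try append / except KeyError, then the membership guard
def sortStepsA_step (d : PySem.Dict String (List String)) (p : String × String) :
    PySem.Dict String (List String) :=
  let d1 := match d.get? p.2 with
    | some v => d.insert p.2 (v ++ [p.1])   -- step_dict[step].append(dependency)
    | none   => d.insert p.2 [p.1]          -- except KeyError: step_dict[step] = [dependency]
  if d1.contains p.1 then d1 else d1.insert p.1 []   -- if dependency not in step_dict: …

def sort_steps (steps : List (String × String)) : List (String × List String) :=
  (steps.foldl sortStepsA_step PySem.Dict.empty).items

-- ===== PORT B =====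
def sort_steps_alt (steps : List (String × String)) : List (String × List String) :=
  let edges := steps
  let order := PySem.List.dedup (edges.flatMap (fun e => [e.2, e.1]))  -- dict.fromkeys(…)
  order.map (fun node => (node, (edges.filter (fun p => p.2 == node)).map (·.1)))

-- ===== PRECONDITION & SPEC =====
def Spec_sort_steps (steps : List (String × String)) (out : List (String × List String)) : Prop := out = sort_steps_alt steps
instance (steps : List (String × String)) (out : List (String × List String)) : Decidable (Spec_sort_steps steps out) := by unfold Spec_sort_steps; infer_instance

-- ===== CLAIM (what is proved, stated in full; the proofs are below) =====
def Claim_equal_sort_steps : Prop := ∀ (steps : List (String × String)), Dom_sort_steps steps → Spec_sort_steps steps (sort_steps steps)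

-- ===== LEMMAS AND PROOFS =====

-- keys of one A-step: add the step, then the dependency
lemma keys_sortStepsA_step (d : PySem.Dict String (List String)) (p : String × String) :
    (sortStepsA_step d p).keys = PySem.Set.add (PySem.Set.add d.keys p.2) p.1 := by
  unfold sortStepsA_step
  cases h : d.get? p.2 with
  | some v =>
      have hc : d.contains p.2 = true := by
        rw [PySem.Dict.contains_eq_isSome_get?, h]; rfl
      have hmem : p.2 ∈ d.keys := (PySem.Dict.contains_iff_mem_keys d p.2).1 hc
      rw [PySem.Set.add_of_mem hmem]
      by_cases h1 : (d.insert p.2 (v ++ [p.1])).contains p.1 = true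
      · have hm1 : p.1 ∈ d.keys := by
          have := (PySem.Dict.contains_iff_mem_keys _ p.1).1 h1
          rwa [PySem.Dict.keys_insert_of_contains d _ hc] at this
        rw [if_pos h1, PySem.Dict.keys_insert_of_contains d _ hc,
          PySem.Set.add_of_mem hm1]
      · have h1f : (d.insert p.2 (v ++ [p.1])).contains p.1 = false := by
          simpa using h1
        have hm1n : p.1 ∉ d.keys := by
          intro hm
          exact h1 ((PySem.Dict.contains_iff_mem_keys _ p.1).2 (by
            rwa [PySem.Dict.keys_insert_of_contains d _ hc]))
        rw [if_neg h1, PySem.Dict.keys_insert_of_not_contains _ _ h1f,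
          PySem.Dict.keys_insert_of_contains d _ hc, PySem.Set.add_of_not_mem hm1n]
  | none =>
      have hc : d.contains p.2 = false := by
        rw [PySem.Dict.contains_eq_isSome_get?, h]; rfl
      have hnm2 : p.2 ∉ d.keys := fun hm => by
        simp [(PySem.Dict.contains_iff_mem_keys d p.2).2 hm] at hc
      rw [PySem.Set.add_of_not_mem hnm2]
      by_cases h1 : (d.insert p.2 [p.1]).contains p.1 = true
      · have hm1 : p.1 ∈ d.keys ++ [p.2] := by
          have := (PySem.Dict.contains_iff_mem_keys _ p.1).1 h1
          rwa [PySem.Dict.keys_insert_of_not_contains d _ hc] at this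
        rw [if_pos h1, PySem.Dict.keys_insert_of_not_contains d _ hc,
          PySem.Set.add_of_mem hm1]
      · have h1f : (d.insert p.2 [p.1]).contains p.1 = false := by simpa using h1
        have hm1n : p.1 ∉ d.keys ++ [p.2] := by
          intro hm
          exact h1 ((PySem.Dict.contains_iff_mem_keys _ p.1).2 (by
            rwa [PySem.Dict.keys_insert_of_not_contains d _ hc]))
        rw [if_neg h1, PySem.Dict.keys_insert_of_not_contains _ _ h1f,
          PySem.Dict.keys_insert_of_not_contains d _ hc, PySem.Set.add_of_not_mem hm1n]

-- keys of A's whole loop: Set.update with both endpoints of every edge, step first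
lemma keys_foldl_sortStepsA (steps : List (String × String))
    (d : PySem.Dict String (List String)) :
    (steps.foldl sortStepsA_step d).keys
      = PySem.Set.update d.keys (steps.flatMap (fun p => [p.2, p.1])) := by
  induction steps generalizing d with
  | nil => simp [PySem.Set.update_nil]
  | cons p rest ih =>
      simp only [List.foldl_cons, List.flatMap_cons, ih]
      rw [keys_sortStepsA_step]
      simp [PySem.Set.update_cons]

-- getD of one A-step with default []: append the dependency iff the key is the step
lemma getD_sortStepsA_step (d : PySem.Dict String (List String)) (p : String × String)
    (k : String) :
    (sortStepsA_step d p).getD k []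
      = d.getD k [] ++ (if p.2 = k then [p.1] else []) := by
  cases h : d.get? p.2 with
  | some v =>
      have hv : d.getD p.2 [] = v := PySem.Dict.getD_of_get?_eq_some d [] h
      have hred : sortStepsA_step d p
          = (if (d.insert p.2 (v ++ [p.1])).contains p.1 then d.insert p.2 (v ++ [p.1])
             else (d.insert p.2 (v ++ [p.1])).insert p.1 []) := by
        unfold sortStepsA_step; rw [h]
      by_cases h1 : (d.insert p.2 (v ++ [p.1])).contains p.1 = true
      · rw [hred, if_pos h1, PySem.Dict.getD_insert]
        by_cases hk : k = p.2
        · simp [hk, hv]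
        · have hk2 : ¬ p.2 = k := fun hh => hk hh.symm
          simp [hk, hk2]
      · rw [hred, if_neg h1, PySem.Dict.getD_insert]
        by_cases hk1 : k = p.1
        · subst hk1
          rw [if_pos rfl]
          have hne : ¬ p.2 = p.1 := by
            intro he
            apply h1
            rw [← he]
            exact PySem.Dict.contains_insert_self _ _ _
          have hcf : d.contains p.1 = false := by
            have : (d.insert p.2 (v ++ [p.1])).contains p.1 = false := by simpa using h1
            rw [PySem.Dict.contains_insert] at this
            simpa using (Bool.or_eq_false_iff.1 this).2
          simp [PySem.Dict.getD_of_not_contains d [] hcf, hne]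
        · rw [if_neg hk1, PySem.Dict.getD_insert]
          by_cases hk : k = p.2
          · simp [hk, hv]
          · have hk2 : ¬ p.2 = k := fun hh => hk hh.symm
            simp [hk, hk2]
  | none =>
      have hv : d.getD p.2 [] = [] := PySem.Dict.getD_of_get?_eq_none d [] h
      have hred : sortStepsA_step d p
          = (if (d.insert p.2 [p.1]).contains p.1 then d.insert p.2 [p.1]
             else (d.insert p.2 [p.1]).insert p.1 []) := by
        unfold sortStepsA_step; rw [h]
      by_cases h1 : (d.insert p.2 [p.1]).contains p.1 = true
      · rw [hred, if_pos h1, PySem.Dict.getD_insert]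
        by_cases hk : k = p.2
        · simp [hk, hv]
        · have hk2 : ¬ p.2 = k := fun hh => hk hh.symm
          simp [hk, hk2]
      · rw [hred, if_neg h1, PySem.Dict.getD_insert]
        by_cases hk1 : k = p.1
        · subst hk1
          rw [if_pos rfl]
          have hne : ¬ p.2 = p.1 := by
            intro he
            apply h1
            rw [← he]
            exact PySem.Dict.contains_insert_self _ _ _
          have hcf : d.contains p.1 = false := by
            have : (d.insert p.2 [p.1]).contains p.1 = false := by simpa using h1
            rw [PySem.Dict.contains_insert] at this
            simpa using (Bool.or_eq_false_iff.1 this).2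
          simp [PySem.Dict.getD_of_not_contains d [] hcf, hne]
        · rw [if_neg hk1, PySem.Dict.getD_insert]
          by_cases hk : k = p.2
          · simp [hk, hv]
          · have hk2 : ¬ p.2 = k := fun hh => hk hh.symm
            simp [hk, hk2]

-- getD of A's whole loop: the dependencies whose step is k, in order
lemma getD_foldl_sortStepsA (steps : List (String × String))
    (d : PySem.Dict String (List String)) (k : String) :
    (steps.foldl sortStepsA_step d).getD k []
      = d.getD k [] ++ (steps.filter (fun p => p.2 == k)).map (·.1) := by
  induction steps generalizing d with
  | nil => simp
  | cons p rest ih =>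
      simp only [List.foldl_cons, ih, getD_sortStepsA_step]
      by_cases hk : p.2 = k
      · simp [hk]
      · simp [hk]

-- ===== VERDICT (by name: the statement is the Claim_ definition above) =====
theorem sort_steps_spec : Claim_equal_sort_steps := by
  intro steps _
  unfold Spec_sort_steps sort_steps sort_steps_alt
  set nodes := PySem.List.dedup (steps.flatMap (fun e => [e.2, e.1])) with hnodes
  set dA := steps.foldl sortStepsA_step PySem.Dict.empty with hdA
  have hnodes_nodup : nodes.Nodup := by
    rw [hnodes, PySem.List.dedup_eq_ofList]; exact PySem.Set.nodup_ofList _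
  have hkA : dA.keys = nodes := by
    rw [hdA, keys_foldl_sortStepsA, hnodes]
    simp [PySem.Set.update_nil_left, PySem.List.dedup_eq_ofList]
  rw [PySem.Dict.items_eq_map_keys dA (by rw [hkA]; exact hnodes_nodup) [], hkA]
  exact List.map_congr_left (fun k _ => by
    rw [hdA, getD_foldl_sortStepsA]; simp)
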